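-- pv_equiv track=rewrite | github.com/HarduinHero/AOC | 2025/2025_03/src/python/main_part2.py | find_largest_pos2
-- ===== SOURCE A (Python) =====
-- def find_largest_pos2(pack:list[int], place_value:int, last_largest_pos:int) -> int :
--     if place_value < 0 or place_value > 11 :
--         raise ValueError("place Value must be in [0;11] !")
--     # searching for first digit
--     if place_value == 11 :
--         largest_pos = 0
--         end = len(pack) - place_value
--         largest = pack[0]
--     # searching for other digits
--     else :
--         largest_pos = last_largest_pos+1
--         end = len(pack) - place_value
--         largest = pack[last_largest_pos+1]
--
--     for i in range(largest_pos, end) :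
--         if pack[i] == 9 :
--             return i
--         if pack[i] > largest :
--             largest = pack[i]
--             largest_pos = i
--     return largest_pos
-- ===== SOURCE B (Python) =====
-- def find_largest_pos2(pack: list[int], place_value: int, last_largest_pos: int) -> int:
--     if place_value < 0 or place_value > 11:
--         raise ValueError("place Value must be in [0;11] !")
--     start = 0 if place_value == 11 else last_largest_pos + 1
--     end = len(pack) - place_value
--     largest = pack[start]
--     # pass 1: the sentinel 9 wins immediately at its first position
--     for i in range(start, end):
--         if pack[i] == 9:
--             return i
--     # pass 2: no sentinel in the subrange -> first-occurrence maximum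
--     best_pos = start
--     for i in range(start, end):
--         if pack[i] > largest:
--             largest = pack[i]
--             best_pos = i
--     return best_pos
-- ===== Notes on version B (the rewrite author's own statement) =====
-- stated objective: alternative
-- what changed: A's single early-exit pass that interleaves the 9-sentinel check with max tracking is decomposed into two separate passes over the same index range: first find the first 9 and return its index, otherwise take the first-occurrence maximum.
import Mathlib
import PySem

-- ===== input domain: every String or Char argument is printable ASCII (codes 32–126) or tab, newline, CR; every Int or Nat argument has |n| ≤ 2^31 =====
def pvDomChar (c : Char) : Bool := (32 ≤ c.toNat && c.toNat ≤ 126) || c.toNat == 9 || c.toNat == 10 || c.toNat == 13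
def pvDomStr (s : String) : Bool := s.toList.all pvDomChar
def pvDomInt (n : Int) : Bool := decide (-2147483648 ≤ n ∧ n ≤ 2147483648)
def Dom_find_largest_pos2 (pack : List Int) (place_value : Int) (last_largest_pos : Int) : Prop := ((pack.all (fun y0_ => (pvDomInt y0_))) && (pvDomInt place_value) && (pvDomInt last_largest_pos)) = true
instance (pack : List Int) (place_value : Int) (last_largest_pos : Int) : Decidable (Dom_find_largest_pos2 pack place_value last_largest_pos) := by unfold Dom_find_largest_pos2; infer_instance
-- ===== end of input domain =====

-- B replaces A's single pass with early exit (tracking max and position together) by two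
-- separate passes over the same index range: find the first 9, else take the first-occurrence
-- maximum; objective: alternative decomposition (same cost).

-- ===== PORT A =====
-- A's loop: for i in range(largest_pos, end): if pack[i]==9 return i; if pack[i]>largest update.
-- pyGetD default 0 is never used: Pre_ guarantees the initial index is in range and the loop
-- indices stay in range.
def loopA (idxs : List Int) (pack : List Int) (largest largest_pos : Int) : Int :=
  match idxs with
  | [] => largest_pos
  | i :: rest =>
    let v := PySem.List.pyGetD pack i 0
    if v == 9 then i
    else if v > largest then loopA rest pack v i
    else loopA rest pack largest largest_pos

def find_largest_pos2 (pack : List Int) (place_value : Int) (last_largest_pos : Int) : Int :=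
  if place_value < 0 ∨ place_value > 11 then 0  -- ValueError: excluded by Pre_
  else if place_value == 11 then
    let endi : Int := (pack.length : Int) - place_value
    match PySem.List.pyGet? pack 0 with
    | none => 0  -- IndexError: excluded by Pre_
    | some largest => loopA (PySem.List.pyRange 0 endi 1) pack largest 0
  else
    let largest_pos := last_largest_pos + 1
    let endi : Int := (pack.length : Int) - place_value
    match PySem.List.pyGet? pack (last_largest_pos + 1) with
    | none => 0  -- IndexError: excluded by Pre_
    | some largest => loopA (PySem.List.pyRange largest_pos endi 1) pack largest largest_pos

-- ===== PORT B =====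
-- pass 1: first index holding a 9
def findNine (idxs : List Int) (pack : List Int) : Option Int :=
  match idxs with
  | [] => none
  | i :: rest => if PySem.List.pyGetD pack i 0 == 9 then some i else findNine rest pack

-- pass 2: first-occurrence maximum, seeded with (largest, best_pos)
def argmaxFrom (idxs : List Int) (pack : List Int) (largest best_pos : Int) : Int :=
  match idxs with
  | [] => best_pos
  | i :: rest =>
    let v := PySem.List.pyGetD pack i 0
    if v > largest then argmaxFrom rest pack v i
    else argmaxFrom rest pack largest best_pos

def find_largest_pos2_alt (pack : List Int) (place_value : Int) (last_largest_pos : Int) : Int :=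
  if place_value < 0 ∨ place_value > 11 then 0  -- ValueError: excluded by Pre_
  else
    let start : Int := if place_value == 11 then 0 else last_largest_pos + 1
    let endi : Int := (pack.length : Int) - place_value
    match PySem.List.pyGet? pack start with
    | none => 0  -- IndexError: excluded by Pre_
    | some largest =>
      let idxs := PySem.List.pyRange start endi 1
      match findNine idxs pack with
      | some i => i
      | none => argmaxFrom idxs pack largest start

-- ===== PRECONDITION & SPEC =====
-- Pre_ = exactly the inputs where Python A returns: place_value in [0,11] (else ValueError)
-- and the initial index start = (0 if place_value==11 else last_largest_pos+1) is a valid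
-- Python index of pack (else IndexError on pack[start]).
def Pre_find_largest_pos2 (pack : List Int) (place_value : Int) (last_largest_pos : Int) : Prop :=
  0 ≤ place_value ∧ place_value ≤ 11 ∧
  PySem.Raise.InRange pack.length (if place_value == 11 then 0 else last_largest_pos + 1)
instance (pack : List Int) (place_value : Int) (last_largest_pos : Int) : Decidable (Pre_find_largest_pos2 pack place_value last_largest_pos) := by unfold Pre_find_largest_pos2; infer_instance

def pvWitness_find_largest_pos2 : List Int × Int × Int := ([3, 1, 4, 1, 5], 11, 0)

def Spec_find_largest_pos2 (pack : List Int) (place_value : Int) (last_largest_pos : Int) (out : Int) : Prop := out = find_largest_pos2_alt pack place_value last_largest_pos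
instance (pack : List Int) (place_value : Int) (last_largest_pos : Int) (out : Int) : Decidable (Spec_find_largest_pos2 pack place_value last_largest_pos out) := by unfold Spec_find_largest_pos2; infer_instance

-- ===== CLAIM (what is proved, stated in full; the proofs are below) =====
def Claim_equal_find_largest_pos2 : Prop := ∀ (pack : List Int) (place_value : Int) (last_largest_pos : Int), Dom_find_largest_pos2 pack place_value last_largest_pos → Pre_find_largest_pos2 pack place_value last_largest_pos → Spec_find_largest_pos2 pack place_value last_largest_pos (find_largest_pos2 pack place_value last_largest_pos)

-- ===== LEMMAS AND PROOFS =====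
-- A's single early-exit pass equals B's two-pass decomposition, on any index list and seed.
theorem loopA_eq_two_pass (idxs pack : List Int) (largest best_pos : Int) :
    loopA idxs pack largest best_pos =
      match findNine idxs pack with
      | some i => i
      | none => argmaxFrom idxs pack largest best_pos := by
  induction idxs generalizing largest best_pos with
  | nil => simp [loopA, findNine, argmaxFrom]
  | cons i rest ih =>
    simp only [loopA, findNine, argmaxFrom]
    by_cases h9 : PySem.List.pyGetD pack i 0 == 9
    · simp [h9]
    · simp only [h9, Bool.false_eq_true, ite_false]
      by_cases hgt : PySem.List.pyGetD pack i 0 > largest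
      · simp [hgt, ih]
      · simp [hgt, ih]

theorem find_largest_pos2_eq (pack : List Int) (place_value last_largest_pos : Int) :
    find_largest_pos2 pack place_value last_largest_pos =
      find_largest_pos2_alt pack place_value last_largest_pos := by
  unfold find_largest_pos2 find_largest_pos2_alt
  by_cases herr : place_value < 0 ∨ place_value > 11
  · simp [herr]
  · simp only [herr, ite_false]
    by_cases h11 : place_value == 11
    · simp only [h11, ite_true]
      cases PySem.List.pyGet? pack 0 with
      | none => rfl
      | some largest => exact loopA_eq_two_pass _ _ _ _
    · simp only [h11, Bool.false_eq_true, ite_false]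
      cases PySem.List.pyGet? pack (last_largest_pos + 1) with
      | none => rfl
      | some largest => exact loopA_eq_two_pass _ _ _ _

-- ===== VERDICT (by name: the statement is the Claim_ definition above) =====
theorem find_largest_pos2_spec : Claim_equal_find_largest_pos2 := by
  intro pack place_value last_largest_pos _ _
  exact find_largest_pos2_eq pack place_value last_largest_pos
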